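-- pv_equiv track=rewrite | github.com/danyy1l/Advent-of-Code | 03/03_p2.py | subsecuencia_mayor
-- ===== SOURCE A (Python) =====
-- def subsecuencia_mayor(line, k=12):
--     nums = [int(x) for x in line]
--
--     n = len(nums)
--     libre = n - k
--
--     stack = []
--
--     for num in nums:
--         while libre > 0 and stack and stack[-1] < num:
--             stack.pop()
--             libre -= 1
--         stack.append(num)
--
--     return "".join(map(str, stack[:k]))
-- ===== SOURCE B (Python) =====
-- def subsecuencia_mayor(line, k=12):
--     nums = [int(x) for x in line]
--     n = len(nums)
--     if n <= k:
--         return "".join(map(str, nums))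
--     res = []
--     start = 0
--     for i in range(k):
--         window = nums[start:n - k + i + 1]
--         m = max(window)
--         start += window.index(m) + 1
--         res.append(m)
--     return "".join(map(str, res))
-- ===== Notes on version B (the rewrite author's own statement) =====
-- stated objective: alternative
-- what changed: Replaces the budgeted monotonic stack (pop-while-smaller with a 'libre' counter, then slice stack[:k]) by greedy repeated window-maximum selection: for each of the k output positions pick the leftmost maximum of the feasible window nums[start:n-k+i+1] and restart after it.
-- outside the precondition, e.g. on subsecuencia_mayor('321', -1): A returns '32', B returns ''
import Mathlib
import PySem

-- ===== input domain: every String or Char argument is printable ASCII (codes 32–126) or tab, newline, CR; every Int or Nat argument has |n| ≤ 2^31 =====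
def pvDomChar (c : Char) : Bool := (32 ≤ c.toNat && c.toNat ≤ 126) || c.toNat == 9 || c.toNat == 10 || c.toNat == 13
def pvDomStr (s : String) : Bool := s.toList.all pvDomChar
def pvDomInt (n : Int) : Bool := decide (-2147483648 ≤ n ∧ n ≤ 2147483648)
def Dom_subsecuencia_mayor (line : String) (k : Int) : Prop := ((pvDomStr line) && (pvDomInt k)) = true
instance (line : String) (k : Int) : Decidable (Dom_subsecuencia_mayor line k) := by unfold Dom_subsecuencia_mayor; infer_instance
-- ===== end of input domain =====

-- B replaces A's budgeted monotonic stack by repeated leftmost window-maximum selection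
-- (alternative algorithm, same exact output); equivalence proved for digit lines and k ≥ 0.


-- ===== PORT A =====
-- A's inner `while libre > 0 and stack and stack[-1] < num: stack.pop(); libre -= 1`
-- (stack stored bottom-first, as in Python; stack[-1] via PySem.List.pyGetD).
def pvPopWhile (stack : List Int) (libre num : Int) : List Int × Int :=
  if h : 0 < libre ∧ stack ≠ [] ∧ PySem.List.pyGetD stack (-1) 0 < num then
    pvPopWhile stack.dropLast (libre - 1) num
  else (stack, libre)
termination_by stack.length
decreasing_by
  have : stack.length ≠ 0 := fun h0 => h.2.1 (List.eq_nil_of_length_eq_zero h0)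
  simp [List.length_dropLast]; omega

def subsecuencia_mayor (line : String) (k : Int) : String :=
  let nums := line.toList.map (fun x => (PySem.Int.ofStr? (String.ofList [x])).getD 0)
  let n := PySem.List.len nums
  let libre := n - k
  let r := nums.foldl (fun (st : List Int × Int) num =>
      let p := pvPopWhile st.1 st.2 num
      (p.1 ++ [num], p.2)) ([], libre)
  PySem.Str.join "" ((PySem.List.slice r.1 none (some k)).map PySem.Int.toStr)

-- ===== PORT B =====
def subsecuencia_mayor_alt (line : String) (k : Int) : String :=
  let nums := line.toList.map (fun x => (PySem.Int.ofStr? (String.ofList [x])).getD 0)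
  let n := PySem.List.len nums
  if n ≤ k then PySem.Str.join "" (nums.map PySem.Int.toStr)
  else
    let r := (PySem.List.pyRange 0 k 1).foldl (fun (st : Int × List Int) i =>
        let window := PySem.List.slice nums (some st.1) (some (n - k + i + 1))
        let m := (PySem.List.max? window (fun x => x)).getD 0
        (st.1 + (((PySem.List.index? window m).getD 0 : Nat) : Int) + 1, st.2 ++ [m]))
      ((0 : Int), ([] : List Int))
    PySem.Str.join "" (r.2.map PySem.Int.toStr)

-- ===== PRECONDITION & SPEC =====
-- Pre_ excludes lines with a non-digit character, on which A's int(x) raises ValueError, and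
-- negative k, an unspecified corner where A's value via Python's negative slice stack[:k] and
-- B's empty selection are both accidental choices.
def Pre_subsecuencia_mayor (line : String) (k : Int) : Prop :=
  (line.toList.all (fun c => decide ('0' ≤ c) && decide (c ≤ '9')) = true) ∧ 0 ≤ k
instance (line : String) (k : Int) : Decidable (Pre_subsecuencia_mayor line k) := by
  unfold Pre_subsecuencia_mayor; infer_instance

def pvWitness_subsecuencia_mayor : String × Int := ("21", 1)

def Spec_subsecuencia_mayor (line : String) (k : Int) (out : String) : Prop := out = subsecuencia_mayor_alt line k
instance (line : String) (k : Int) (out : String) : Decidable (Spec_subsecuencia_mayor line k out) := by unfold Spec_subsecuencia_mayor; infer_instance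

-- ===== CLAIM (what is proved, stated in full; the proofs are below) =====
def Claim_equal_subsecuencia_mayor : Prop := ∀ (line : String) (k : Int), Dom_subsecuencia_mayor line k → Pre_subsecuencia_mayor line k → Spec_subsecuencia_mayor line k (subsecuencia_mayor line k)

-- ===== LEMMAS AND PROOFS =====

def pvPopW (num : Int) : List Int → Int → List Int × Int
  | [], l => ([], l)
  | t :: rest, l => if 0 < l ∧ t < num then pvPopW num rest (l - 1) else (t :: rest, l)

lemma popWhile_eq (s : List Int) (l num : Int) :
    pvPopWhile s l num = ((pvPopW num s.reverse l).1.reverse, (pvPopW num s.reverse l).2) := by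
  induction s, l using pvPopWhile.induct (num := num) with
  | case1 s l h ih =>
    rw [pvPopWhile, dif_pos h]
    obtain ⟨h1, h2, h3⟩ := h
    have hrev : s.reverse = s.getLast h2 :: s.dropLast.reverse := by
      conv_lhs => rw [← List.dropLast_append_getLast h2]
      simp
    rw [PySem.List.pyGetD_neg_one s 0 h2] at h3
    rw [hrev]
    simp only [pvPopW]
    rw [if_pos (⟨h1, h3⟩ : 0 < l ∧ s.getLast h2 < num)]
    exact ih
  | case2 s l h =>
    rw [pvPopWhile, dif_neg h]
    rcases s.eq_nil_or_concat with hnil | ⟨ys, y, hys⟩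
    case inl => subst hnil; simp [pvPopW]
    case inr =>
      subst hys
      simp only [List.concat_eq_append] at h ⊢
      have hcond : ¬(0 < l ∧ y < num) := by
        rintro ⟨c1, c2⟩
        refine h ⟨c1, by simp, ?_⟩
        rw [PySem.List.pyGetD_neg_one_append_singleton]; exact c2
      have hrev : (ys ++ [y]).reverse = y :: ys.reverse := by simp
      rw [hrev]
      simp only [pvPopW]
      rw [if_neg hcond]
      simp

def pvStep (st : List Int × Int) (num : Int) : List Int × Int :=
  (num :: (pvPopW num st.1 st.2).1, (pvPopW num st.1 st.2).2)

def pvRun (xs : List Int) (st : List Int × Int) : List Int × Int := xs.foldl pvStep st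

lemma popW_drop (num : Int) (s : List Int) : ∀ (l : Int),
    ∃ p : Nat, p ≤ s.length ∧ pvPopW num s l = (s.drop p, l - p) ∧ (0 ≤ l → 0 ≤ l - (p : Int)) := by
  induction s with
  | nil => intro l; exact ⟨0, by simp [pvPopW]⟩
  | cons t rest ih =>
    intro l
    by_cases h : 0 < l ∧ t < num
    · obtain ⟨p, hp, he, hpos⟩ := ih (l - 1)
      refine ⟨p + 1, by simpa using hp, ?_, ?_⟩
      · simp only [pvPopW, if_pos h, he, List.drop_succ_cons]
        congr 1
        push_cast; ring
      · intro h0; have := hpos (by omega); push_cast at this ⊢; omega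
    · refine ⟨0, by simp, ?_, by simp⟩
      simp [pvPopW, if_neg h]

lemma run_state (ys : List Int) : ∀ (s : List Int) (l : Int),
    ((pvRun ys (s, l)).2 - ((pvRun ys (s, l)).1.length : Int) = l - s.length - ys.length)
    ∧ (∀ x ∈ (pvRun ys (s, l)).1, x ∈ s ∨ x ∈ ys)
    ∧ (0 ≤ l → 0 ≤ (pvRun ys (s, l)).2) := by
  induction ys with
  | nil => intro s l; simp [pvRun]
  | cons y ys' ih =>
    intro s l
    obtain ⟨p, hp, he, hpos⟩ := popW_drop y s l
    have hstep : pvRun (y :: ys') (s, l) = pvRun ys' (y :: s.drop p, l - p) := by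
      simp only [pvRun, List.foldl_cons, pvStep, he]
    obtain ⟨ih1, ih2, ih3⟩ := ih (y :: s.drop p) (l - p)
    refine ⟨?_, ?_, ?_⟩
    · rw [hstep, ih1]
      have : (s.drop p).length = s.length - p := List.length_drop ..
      simp only [List.length_cons, this]
      push_cast [Nat.cast_sub hp]
      ring
    · rw [hstep]
      intro x hx
      rcases ih2 x hx with hx1 | hx2
      · rcases List.mem_cons.mp hx1 with hc1 | hc1
        · right; simp [hc1]
        · left; exact List.mem_of_mem_drop hc1
      · right; simp [hx2]
    · intro h0; rw [hstep]; exact ih3 (hpos h0)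

lemma run_nopop (ys : List Int) : ∀ (s : List Int) (l : Int), l ≤ 0 →
    pvRun ys (s, l) = (ys.reverse ++ s, l) := by
  induction ys with
  | nil => intro s l _; simp [pvRun]
  | cons y ys' ih =>
    intro s l hl
    have hno : pvPopW y s l = (s, l) := by
      cases s with
      | nil => rfl
      | cons t rest => simp only [pvPopW]; rw [if_neg]; rintro ⟨h1, _⟩; omega
    have : pvRun (y :: ys') (s, l) = pvRun ys' (y :: s, l) := by
      simp only [pvRun, List.foldl_cons, pvStep, hno]
    rw [this, ih (y :: s) l hl]
    simp

lemma popW_protect (num m : Int) (s : List Int) : ∀ (l : Int), 0 ≤ l →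
    (m < num → l ≤ (s.length : Int)) →
    pvPopW num (s ++ [m]) l = ((pvPopW num s l).1 ++ [m], (pvPopW num s l).2) := by
  induction s with
  | nil =>
    intro l h0 hm
    simp only [List.nil_append, pvPopW]
    rw [if_neg]; rintro ⟨h1, h2⟩; have := hm h2; simp at this; omega
  | cons t rest ih =>
    intro l h0 hm
    by_cases h : 0 < l ∧ t < num
    · simp only [List.cons_append, pvPopW, if_pos h]
      exact ih (l - 1) (by omega) (fun hmn => by have := hm hmn; simp only [List.length_cons] at this; push_cast at this ⊢; omega)
    · simp only [List.cons_append, pvPopW, if_neg h]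

lemma run_protect (m : Int) (ys : List Int) : ∀ (s : List Int) (l : Int), 0 ≤ l →
    (∀ t (ht : t < ys.length), m < ys[t] → l ≤ (s.length : Int) + t) →
    pvRun ys (s ++ [m], l) = ((pvRun ys (s, l)).1 ++ [m], (pvRun ys (s, l)).2) := by
  induction ys with
  | nil => intro s l _ _; simp [pvRun]
  | cons y ys' ih =>
    intro s l h0 hh
    obtain ⟨p, hp, he, hpos⟩ := popW_drop y s l
    have hprot := popW_protect y m s l h0 (fun hmy => by
      have := hh 0 (by simp) (by simpa using hmy)
      simpa using this)
    have hstep1 : pvRun (y :: ys') (s ++ [m], l) = pvRun ys' ((y :: s.drop p) ++ [m], l - p) := by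
      simp only [pvRun, List.foldl_cons, pvStep, hprot, he]
      rfl
    have hstep2 : pvRun (y :: ys') (s, l) = pvRun ys' (y :: s.drop p, l - p) := by
      simp only [pvRun, List.foldl_cons, pvStep, he]
    rw [hstep1, hstep2]
    refine ih (y :: s.drop p) (l - p) (hpos h0) ?_
    intro t ht hmt
    have := hh (t + 1) (by simpa using ht) (by simpa using hmt)
    have hdl : (s.drop p).length = s.length - p := List.length_drop ..
    simp only [List.length_cons, hdl] at this ⊢
    push_cast [Nat.cast_sub hp] at this ⊢
    omega

lemma popW_clear (num : Int) (s : List Int) : ∀ (l : Int), (∀ x ∈ s, x < num) →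
    ((s.length : Int) ≤ l) → pvPopW num s l = ([], l - s.length) := by
  induction s with
  | nil => intro l _ _; simp [pvPopW]
  | cons t rest ih =>
    intro l hs hl
    have hlen : (((t :: rest).length : Nat) : Int) = (rest.length : Int) + 1 := by
      simp only [List.length_cons]; push_cast; ring
    have hc : 0 < l ∧ t < num := ⟨by omega, hs t (by simp)⟩
    rw [pvPopW, if_pos hc, ih (l - 1) (fun x hx => hs x (by simp [hx])) (by omega)]
    congr 1; omega

lemma run_clear (m : Int) (pre : List Int) (l : Int) (hs : ∀ x ∈ pre, x < m)
    (hl : (pre.length : Int) ≤ l) :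
    pvRun (pre ++ [m]) ([], l) = ([m], l - pre.length) := by
  have hsplit : pvRun (pre ++ [m]) ([], l) = pvRun [m] (pvRun pre ([], l)) := by
    simp [pvRun, List.foldl_append]
  obtain ⟨h1, h2, h3⟩ := run_state pre [] l
  set st := pvRun pre ([], l) with hst
  have hmem : ∀ x ∈ st.1, x < m := by
    intro x hx
    rcases h2 x hx with hin | hin
    · simp at hin
    · exact hs x hin
  have hlen2 : st.2 - (st.1.length : Int) = l - pre.length := by
    simpa using h1
  have hlen : (st.1.length : Int) ≤ st.2 := by
    omega
  rw [hsplit]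
  have hone : pvRun [m] st = (m :: (pvPopW m st.1 st.2).1, (pvPopW m st.1 st.2).2) := by
    simp only [pvRun, List.foldl_cons, List.foldl_nil, pvStep]
  rw [hone, popW_clear m st.1 st.2 hmem hlen]
  rw [show st.2 - (st.1.length : Int) = l - pre.length from hlen2]


lemma window_facts (w : List Int) (hw : w ≠ []) :
    ∃ m, (PySem.List.max? w (fun x => x)).getD 0 = m ∧
    ∃ j : Nat, (PySem.List.index? w m).getD 0 = j ∧
    ∃ hj : j < w.length, w[j] = m ∧
      (∀ t (ht : t < w.length), t < j → w[t] ≠ m) ∧ (∀ y ∈ w, y ≤ m) := by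
  obtain ⟨m0, hm0⟩ : ∃ m0, PySem.List.max? w (fun x => x) = some m0 := by
    rcases h : PySem.List.max? w (fun x => x) with _ | m0
    · exact absurd ((PySem.List.max?_eq_none_iff w (fun x => x)).mp h) hw
    · exact ⟨m0, rfl⟩
  refine ⟨m0, by rw [hm0]; rfl, ?_⟩
  have hmem : m0 ∈ w := PySem.List.max?_mem hm0
  obtain ⟨j, hj⟩ : ∃ j, PySem.List.index? w m0 = some j := by
    rcases h : PySem.List.index? w m0 with _ | j
    · exact absurd hmem (by simpa using (PySem.List.index?_eq_none_iff w m0).mp h)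
    · exact ⟨j, rfl⟩
  obtain ⟨hjlt, hget, hfirst⟩ := PySem.List.getElem_of_index?_eq_some hj
  refine ⟨j, by rw [hj]; rfl, hjlt, hget, ?_, ?_⟩
  · intro t ht htj; exact hfirst t htj
  · intro y hy; exact PySem.List.max?_isMax hm0 y hy

def pvPick : List Int → Nat → List Int
  | _, 0 => []
  | xs, r+1 =>
    ((PySem.List.max? (xs.take (xs.length - r)) (fun x => x)).getD 0) ::
      pvPick (xs.drop (((PySem.List.index? (xs.take (xs.length - r))
        ((PySem.List.max? (xs.take (xs.length - r)) (fun x => x)).getD 0)).getD 0) + 1)) r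

lemma core : ∀ (k : Nat) (xs : List Int), k ≤ xs.length →
    (pvRun xs ([], (xs.length : Int) - k)).1.reverse.take k = pvPick xs k := by
  intro k
  induction k with
  | zero => intro xs _; simp [pvPick]
  | succ r ih =>
    intro xs hk
    have hwlen : (xs.take (xs.length - r)).length = xs.length - r :=
      List.length_take_of_le (by omega)
    have hwne : xs.take (xs.length - r) ≠ [] :=
      List.ne_nil_of_length_pos (by rw [hwlen]; omega)
    obtain ⟨m, hm, j, hjdef, hjlt, hwj, hfirst, hmax⟩ := window_facts _ hwne
    rw [hwlen] at hjlt
    have hjn : j < xs.length - r := hjlt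
    have hxj : xs[j]'(by omega) = m := by rw [← hwj]; symm; exact List.getElem_take
    have hpre : ∀ x ∈ xs.take j, x < m := by
      intro x hx
      obtain ⟨t, ht, hget⟩ := List.getElem_of_mem hx
      have htj : t < j := by simp [List.length_take] at ht; omega
      have htw : t < (xs.take (xs.length - r)).length := by rw [hwlen]; omega
      have hxt : (xs.take (xs.length - r))[t] = x := by
        rw [List.getElem_take, ← hget, List.getElem_take]
      have hne : x ≠ m := by rw [← hxt]; exact hfirst t htw htj
      have hle : x ≤ m := hmax x (by rw [← hxt]; exact List.getElem_mem htw)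
      omega
    have hsplit : xs = (xs.take j ++ [m]) ++ xs.drop (j+1) := by
      conv_lhs => rw [← List.take_append_drop (j+1) xs]
      rw [List.take_succ_eq_append_getElem (by omega), hxj]
    have hlenj : (xs.take j).length = j := List.length_take_of_le (by omega)
    have hphase1 : pvRun (xs.take j ++ [m]) ([], (xs.length : Int) - (r+1))
        = ([m], (xs.length : Int) - (r+1) - j) := by
      have hlc : ((xs.take j).length : Int) ≤ (xs.length : Int) - (r+1) := by
        rw [hlenj]; omega
      have := run_clear m (xs.take j) ((xs.length : Int) - (r+1)) hpre hlc
      rw [hlenj] at this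
      exact this
    have hsafe : ∀ t (ht : t < (xs.drop (j+1)).length),
        m < (xs.drop (j+1))[t] → (xs.length : Int) - (r+1) - j ≤ (([] : List Int).length : Int) + t := by
      intro t ht hmt
      simp only [List.length_nil, Nat.cast_zero, zero_add]
      by_contra hcon
      have hd : (xs.drop (j+1)).length = xs.length - (j+1) := List.length_drop ..
      have hin : j + 1 + t < xs.length - r := by
        rw [hd] at ht; omega
      have htw : j + 1 + t < (xs.take (xs.length - r)).length := by rw [hwlen]; omega
      have hval : (xs.drop (j+1))[t] = (xs.take (xs.length - r))[j+1+t] := by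
        rw [List.getElem_drop, List.getElem_take]
      have := hmax ((xs.drop (j+1))[t]'ht) (by rw [hval]; exact List.getElem_mem htw)
      omega
    have hrun : pvRun xs ([], (xs.length : Int) - (r+1))
        = ((pvRun (xs.drop (j+1)) ([], (xs.length : Int) - (r+1) - j)).1 ++ [m],
           (pvRun (xs.drop (j+1)) ([], (xs.length : Int) - (r+1) - j)).2) := by
      have h0 := congrArg (fun ys => pvRun ys ([], (xs.length : Int) - (r+1))) hsplit
      simp only at h0
      rw [h0]
      have hfold : pvRun ((xs.take j ++ [m]) ++ xs.drop (j+1)) ([], (xs.length : Int) - (r+1))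
          = pvRun (xs.drop (j+1)) (pvRun (xs.take j ++ [m]) ([], (xs.length : Int) - (r+1))) := by
        simp [pvRun, List.foldl_append]
      rw [hfold, hphase1]
      have hpr := run_protect m (xs.drop (j+1)) [] ((xs.length : Int) - (r+1) - j)
        (by omega) hsafe
      simpa using hpr
    have hcast : (xs.length : Int) - ((r : Int) + 1) = (xs.length : Int) - (↑(r + 1) : Int) := by
      push_cast; ring
    rw [show ((xs.length : Int) - (↑(r+1) : Int)) = (xs.length : Int) - (r+1) from by push_cast; ring]
    rw [hrun]
    rw [List.reverse_append, List.reverse_singleton]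
    simp only [List.singleton_append, List.take_succ_cons]
    have hlend : (xs.drop (j+1)).length = xs.length - (j+1) := List.length_drop ..
    have hlcast : (xs.length : Int) - (r+1) - j = ((xs.drop (j+1)).length : Int) - r := by
      rw [hlend]; omega
    rw [hlcast, ih (xs.drop (j+1)) (by rw [hlend]; omega)]
    conv_rhs => rw [pvPick]
    rw [hm, hjdef]

lemma foldA_eq (xs : List Int) : ∀ (s : List Int) (l : Int),
    xs.foldl (fun (st : List Int × Int) num =>
        let p := pvPopWhile st.1 st.2 num
        (p.1 ++ [num], p.2)) (s, l)
    = ((pvRun xs (s.reverse, l)).1.reverse, (pvRun xs (s.reverse, l)).2) := by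
  induction xs with
  | nil => intro s l; simp [pvRun]
  | cons y ys ih =>
    intro s l
    have hstepA : (let p := pvPopWhile (s, l).1 (s, l).2 y
        ((p.1 ++ [y], p.2) : List Int × Int))
        = ((pvPopW y s.reverse l).1.reverse ++ [y], (pvPopW y s.reverse l).2) := by
      simp only [popWhile_eq]
    have hstepR : pvStep (s.reverse, l) y = (y :: (pvPopW y s.reverse l).1, (pvPopW y s.reverse l).2) := rfl
    have hrev : ((pvPopW y s.reverse l).1.reverse ++ [y]).reverse = y :: (pvPopW y s.reverse l).1 := by
      simp
    calc (y :: ys).foldl _ (s, l)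
        = ys.foldl _ ((pvPopW y s.reverse l).1.reverse ++ [y], (pvPopW y s.reverse l).2) := by
          rw [List.foldl_cons, hstepA]
      _ = ((pvRun ys (y :: (pvPopW y s.reverse l).1, (pvPopW y s.reverse l).2)).1.reverse,
           (pvRun ys (y :: (pvPopW y s.reverse l).1, (pvPopW y s.reverse l).2)).2) := by
          rw [ih, hrev]
      _ = _ := by
          simp only [pvRun, List.foldl_cons, hstepR]

def pvBStep (nums : List Int) (n k : Int) (st : Int × List Int) (i : Int) : Int × List Int :=
  let window := PySem.List.slice nums (some st.1) (some (n - k + i + 1))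
  let m := (PySem.List.max? window (fun x => x)).getD 0
  (st.1 + (((PySem.List.index? window m).getD 0 : Nat) : Int) + 1, st.2 ++ [m])

lemma B_loop (nums : List Int) (k' : Nat) (hk : k' < nums.length) :
    ∀ (r : Nat) (start : Nat) (acc : List Int), r ≤ k' → start + r ≤ nums.length →
    ((PySem.List.pyRange ((k' : Int) - (r : Int)) (k' : Int) 1).foldl
        (pvBStep nums (nums.length : Int) (k' : Int)) (((start : Nat) : Int), acc)).2
      = acc ++ pvPick (nums.drop start) r := by
  intro r
  induction r with
  | zero =>
    intro start acc _ _
    rw [show ((k' : Int) - ((0 : Nat) : Int)) = (k' : Int) by push_cast; ring,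
       PySem.List.pyRange_one_eq_nil (le_refl _)]
    simp [pvPick]
  | succ r' ih =>
    intro start acc hr hsn
    have hlt : (k' : Int) - ((r' + 1 : Nat) : Int) < (k' : Int) := by push_cast; omega
    rw [PySem.List.pyRange_one_cons hlt, List.foldl_cons]
    have hBnd : (nums.length : Int) - (k' : Int) + ((k' : Int) - ((r' + 1 : Nat) : Int)) + 1
        = ((nums.length - r' : Nat) : Int) := by push_cast [Nat.cast_sub (by omega : r' ≤ nums.length)]; omega
    have hwlen : ((nums.drop start).take (nums.length - r' - start)).length
        = nums.length - r' - start := by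
      rw [List.length_take_of_le (by rw [List.length_drop]; omega)]
    have hwne : (nums.drop start).take (nums.length - r' - start) ≠ [] :=
      List.ne_nil_of_length_pos (by rw [hwlen]; omega)
    obtain ⟨m, hm, j, hjdef, hjlt, hwj, hfirst, hmax⟩ := window_facts _ hwne
    rw [hwlen] at hjlt
    have hstep : pvBStep nums (nums.length : Int) (k' : Int)
        (((start : Nat) : Int), acc) ((k' : Int) - ((r' + 1 : Nat) : Int))
        = (((start + j + 1 : Nat) : Int), acc ++ [m]) := by
      simp only [pvBStep, hBnd, PySem.List.slice_natCast, hm, hjdef]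
      norm_cast
    rw [hstep]
    have hnext : (k' : Int) - ((r' + 1 : Nat) : Int) + 1 = (k' : Int) - ((r' : Nat) : Int) := by
      push_cast; ring
    rw [hnext, ih (start + j + 1) (acc ++ [m]) (by omega) (by omega)]
    have hpick : pvPick (nums.drop start) (r' + 1)
        = m :: pvPick (nums.drop (start + j + 1)) r' := by
      rw [pvPick]
      have h1 : (nums.drop start).length - r' = nums.length - r' - start := by
        rw [List.length_drop]; omega
      rw [h1, hm, hjdef, List.drop_drop, Nat.add_assoc]
    rw [hpick]
    simp


theorem subsecuencia_mayor_spec_aux (line : String) (k : Int) (hk0 : 0 ≤ k) :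
    subsecuencia_mayor line k = subsecuencia_mayor_alt line k := by
  unfold subsecuencia_mayor subsecuencia_mayor_alt
  simp only [PySem.List.len_eq]
  set nums := line.toList.map (fun x => (PySem.Int.ofStr? (String.ofList [x])).getD 0) with hnums
  rw [show k = ((k.toNat : Nat) : Int) from (Int.toNat_of_nonneg hk0).symm]
  set k' := k.toNat with hk'
  by_cases hnk : (nums.length : Int) ≤ (k' : Int)
  · rw [if_pos hnk, foldA_eq, List.reverse_nil,
        run_nopop nums [] ((nums.length : Int) - (k' : Int)) (by omega)]
    simp only [List.append_nil, List.reverse_reverse]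
    rw [PySem.List.slice_to nums (by positivity)]
    rw [List.take_of_length_le (by omega : nums.length ≤ ((k' : Int)).toNat)]
  · rw [if_neg hnk, foldA_eq, List.reverse_nil,
        PySem.List.slice_to _ (by positivity)]
    have hklt : k' < nums.length := by omega
    have hA := core k' nums (le_of_lt hklt)
    rw [show ((k' : Int)).toNat = k' from by omega, hA]
    have hB := B_loop nums k' hklt k' 0 [] (le_refl _) (by omega)
    rw [show ((k' : Int) - (k' : Int)) = 0 from by ring] at hB
    simp only [Nat.cast_zero, List.nil_append, List.drop_zero] at hB
    rw [← hB]
    rfl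

-- ===== VERDICT (by name: the statement is the Claim_ definition above) =====
theorem subsecuencia_mayor_spec : Claim_equal_subsecuencia_mayor := by
  unfold Claim_equal_subsecuencia_mayor
  intro line k _ hpre
  unfold Spec_subsecuencia_mayor
  exact subsecuencia_mayor_spec_aux line k hpre.2
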